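-- pv_equiv track=rewrite | github.com/hienle1122/6.145 | Assignment 1.0/Doors.py | ndoors
-- ===== SOURCE A (Python) =====
-- def ndoors(ans):
--     totdoors=[]
--     for i in range(ans):
--         i=i+1
--         totdoors.append(i)
--
--     counter=[]
--     for j in range(ans):
--         count=0
--         for m in range (ans) :
--             m=m+1
--             if totdoors[j] % m == 0:
--                 count=count+1
--             m=m+1
--         counter.append(count)
--     list1=[]
--     for t in range(len(counter)):
--         if counter[t] % 2 != 0 :
--             list1.append(t+1)
--     return list1
-- ===== SOURCE B (Python) =====
-- def ndoors(ans):
--     # Doors left open are exactly the perfect squares <= ans: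
--     # generate them directly instead of counting divisors of every door.
--     res = []
--     k = 1
--     while k * k <= ans:
--         res.append(k * k)
--         k += 1
--     return res
-- ===== Notes on version B (the rewrite author's own statement) =====
-- stated objective: faster
-- what changed: B emits the perfect squares k*k <= ans directly with a single while loop instead of counting divisors of every door with nested loops and then filtering the odd counts.
import Mathlib
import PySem

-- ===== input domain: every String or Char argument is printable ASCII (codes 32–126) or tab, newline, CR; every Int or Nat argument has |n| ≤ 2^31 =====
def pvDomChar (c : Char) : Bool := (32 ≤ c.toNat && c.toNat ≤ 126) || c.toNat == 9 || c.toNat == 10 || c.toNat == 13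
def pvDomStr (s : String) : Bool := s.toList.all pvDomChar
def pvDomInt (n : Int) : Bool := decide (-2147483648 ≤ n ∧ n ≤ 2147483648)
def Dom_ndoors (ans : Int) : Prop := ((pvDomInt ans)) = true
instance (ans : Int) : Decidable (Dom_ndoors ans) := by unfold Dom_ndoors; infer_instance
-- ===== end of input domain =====

-- B replaces A's nested divisor-counting loops by directly generating the perfect squares k*k ≤ ans.

-- ===== PORT A =====
-- literal transliteration of A; totdoors[j] and counter[t] are always in range
-- (j, t come from range(len)), so pyGetD with default 0 is exact here.
def ndoors (ans : Int) : List Int :=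
  let totdoors : List Int :=
    (PySem.List.pyRange 0 ans 1).foldl (fun acc i => acc ++ [i + 1]) []
  let counter : List Int :=
    (PySem.List.pyRange 0 ans 1).foldl (fun acc j =>
      acc ++ [(PySem.List.pyRange 0 ans 1).foldl (fun count m =>
        if PySem.Int.mod (PySem.List.pyGetD totdoors j 0) (m + 1) = 0 then count + 1
        else count) 0]) []
  let list1 : List Int :=
    (PySem.List.pyRange 0 (counter.length : Int) 1).foldl (fun acc t =>
      if PySem.Int.mod (PySem.List.pyGetD counter t 0) 2 ≠ 0 then acc ++ [t + 1]
      else acc) []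
  list1

-- ===== PORT B =====
-- the 'while k*k <= ans' loop of Source B, k counted as a Nat (it starts at 1 and only grows)
def ndoorsAltGo (ans : Int) (k : Nat) (res : List Int) : List Int :=
  if h : (k : Int) * (k : Int) ≤ ans then
    ndoorsAltGo ans (k + 1) (res ++ [(k : Int) * (k : Int)])
  else res
termination_by ans.toNat + 1 - k
decreasing_by
  have hk : (k : Int) ≤ ans := by
    cases k with
    | zero => exact le_trans (by norm_num) h
    | succ k' =>
      refine le_trans ?_ h
      have : (k' + 1 : ℕ) ≤ (k' + 1) * (k' + 1) := Nat.le_mul_of_pos_left _ (Nat.succ_pos k')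
      exact_mod_cast this
  omega

def ndoors_alt (ans : Int) : List Int := ndoorsAltGo ans 1 []

-- ===== PRECONDITION & SPEC =====
def Spec_ndoors (ans : Int) (out : List Int) : Prop := out = ndoors_alt ans
instance (ans : Int) (out : List Int) : Decidable (Spec_ndoors ans out) := by unfold Spec_ndoors; infer_instance

-- ===== CLAIM (what is proved, stated in full; the proofs are below) =====
def Claim_equal_ndoors : Prop := ∀ (ans : Int), Dom_ndoors ans → Spec_ndoors ans (ndoors ans)

-- ===== LEMMAS AND PROOFS =====

-- the common reference value: the squares 1², …, (√n)² as Ints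
def squaresTo (n : ℕ) : List Int :=
  (List.range (Nat.sqrt n)).map (fun (k : ℕ) => ((k : Int) + 1) * ((k : Int) + 1))

-- ---- number theory: a positive n has an odd number of divisors iff it is a square ----
theorem divisor_pos {N d : ℕ} (hN : N ≠ 0) (h : d ∣ N) : 0 < d := by
  rcases Nat.eq_zero_or_pos d with h0 | h0
  · subst h0; exact absurd (Nat.eq_zero_of_zero_dvd h) hN
  · exact h0

theorem odd_card_divisors_iff (N : ℕ) (hN : N ≠ 0) :
    Odd N.divisors.card ↔ IsSquare N := by
  classical
  set S := N.divisors.filter (fun d => d * d < N) with hS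
  set E := N.divisors.filter (fun d => d * d = N) with hE
  set L := N.divisors.filter (fun d => N < d * d) with hL
  have hsplit : N.divisors.card = S.card + (E.card + L.card) := by
    rw [← Finset.filter_card_add_filter_neg_card_eq_card (p := fun d => d * d < N)
      (s := N.divisors)]
    congr 1
    have hEL : N.divisors.filter (fun d => ¬ d * d < N) = E ∪ L := by
      ext d
      simp only [Finset.mem_filter, Finset.mem_union, hE, hL]
      constructor
      · rintro ⟨hd, hlt⟩
        rcases Nat.lt_trichotomy (d * d) N with h | h | h
        · omega
        · exact Or.inl ⟨hd, h⟩
        · exact Or.inr ⟨hd, h⟩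
      · rintro (⟨hd, h⟩ | ⟨hd, h⟩) <;> exact ⟨hd, by omega⟩
    rw [hEL, Finset.card_union_of_disjoint]
    rw [Finset.disjoint_left]
    intro d hd hd'
    simp only [hE, hL, Finset.mem_filter] at hd hd'
    omega
  have hSL : S.card = L.card := by
    apply Finset.card_bij (fun d _ => N / d)
    · intro d hd
      simp only [hS, Finset.mem_filter, Nat.mem_divisors] at hd
      obtain ⟨⟨hdvd, _⟩, hlt⟩ := hd
      have hd0 : 0 < d := divisor_pos hN hdvd
      obtain ⟨e, he⟩ := hdvd
      have hde : N / d = e := by rw [he, Nat.mul_div_cancel_left e hd0]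
      simp only [hL, Finset.mem_filter, Nat.mem_divisors]
      refine ⟨⟨Nat.div_dvd_of_dvd ⟨e, he⟩, hN⟩, ?_⟩
      rw [hde]
      have hlt2 : d < e := by
        by_contra hcon
        push_neg at hcon
        have : d * e ≤ d * d := Nat.mul_le_mul_left d hcon
        omega
      have he0 : 0 < e := by
        rcases Nat.eq_zero_or_pos e with h0 | h0
        · subst h0; simp at he; omega
        · exact h0
      calc N = d * e := he
        _ < e * e := (Nat.mul_lt_mul_right he0).mpr hlt2
    · intro a ha b hb hab
      simp only [hS, Finset.mem_filter, Nat.mem_divisors] at ha hb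
      have := Nat.div_div_self ha.1.1 hN
      rw [hab, Nat.div_div_self hb.1.1 hN] at this
      exact this.symm
    · intro e he
      simp only [hL, Finset.mem_filter, Nat.mem_divisors] at he
      obtain ⟨⟨hdvd, _⟩, hlt⟩ := he
      have he0 : 0 < e := divisor_pos hN hdvd
      obtain ⟨d, hd⟩ := hdvd
      have hed : N / e = d := by rw [hd, Nat.mul_div_cancel_left d he0]
      have hd0 : 0 < d := by
        rcases Nat.eq_zero_or_pos d with h0 | h0
        · subst h0; omega
        · exact h0
      have hde : d < e := by
        by_contra hcon
        push_neg at hcon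
        have : e * e ≤ e * d := Nat.mul_le_mul_left e hcon
        omega
      refine ⟨d, ?_, ?_⟩
      · simp only [hS, Finset.mem_filter, Nat.mem_divisors]
        refine ⟨⟨⟨e, by rw [hd, Nat.mul_comm]⟩, hN⟩, ?_⟩
        calc d * d < d * e := Nat.mul_lt_mul_of_le_of_lt le_rfl hde hd0
          _ = e * d := Nat.mul_comm d e
          _ = N := hd.symm
      · rw [hd, Nat.mul_comm, Nat.mul_div_cancel_left e hd0]
  have hEcard : E.card = if IsSquare N then 1 else 0 := by
    split_ifs with hsq
    · obtain ⟨r, hr⟩ := hsq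
      have : E = {r} := by
        ext d
        simp only [hE, Finset.mem_filter, Nat.mem_divisors, Finset.mem_singleton]
        constructor
        · rintro ⟨_, hdd⟩
          have : d * d = r * r := by omega
          exact Nat.mul_self_inj.mp this
        · rintro rfl
          exact ⟨⟨⟨_, hr⟩, hN⟩, hr.symm⟩
      rw [this, Finset.card_singleton]
    · rw [Finset.card_eq_zero]
      ext d
      simp only [hE, Finset.mem_filter, Nat.mem_divisors, Finset.notMem_empty, iff_false]
      rintro ⟨_, hdd⟩
      exact hsq ⟨d, hdd.symm⟩
  rw [hsplit, hSL, hEcard, Nat.odd_iff]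
  split_ifs with hsq
  · simp only [hsq, iff_true]
    omega
  · simp only [hsq, iff_false]
    omega

-- ---- Nat.sqrt increments exactly at squares ----
theorem sqrt_succ_of_square {n : ℕ} (h : IsSquare (n + 1)) :
    Nat.sqrt (n + 1) = Nat.sqrt n + 1 := by
  obtain ⟨r, hr⟩ := h
  obtain ⟨r', rfl⟩ : ∃ r', r = r' + 1 := by
    cases r with
    | zero => omega
    | succ r' => exact ⟨r', rfl⟩
  have h1 : Nat.sqrt (n + 1) = r' + 1 := by rw [hr, ← pow_two, Nat.sqrt_eq']
  have h2 : Nat.sqrt n < r' + 1 := Nat.sqrt_lt'.mpr (by nlinarith)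
  have h3 : r' ≤ Nat.sqrt n := Nat.le_sqrt'.mpr (by nlinarith)
  omega

theorem sqrt_succ_of_not_square {n : ℕ} (h : ¬ IsSquare (n + 1)) :
    Nat.sqrt (n + 1) = Nat.sqrt n := by
  have h1 : Nat.sqrt n ≤ Nat.sqrt (n + 1) := Nat.sqrt_le_sqrt (by omega)
  have h2 : Nat.sqrt (n + 1) * Nat.sqrt (n + 1) ≤ n + 1 := by
    have := Nat.sqrt_le' (n + 1); rwa [pow_two] at this
  have h3 : Nat.sqrt (n + 1) * Nat.sqrt (n + 1) ≠ n + 1 := fun he => h ⟨_, he.symm⟩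
  have h4 : Nat.sqrt (n + 1) ≤ Nat.sqrt n := Nat.le_sqrt'.mpr (by rw [pow_two]; omega)
  omega

-- ---- the count loop counts divisors ----
theorem countP_divisors (n N : ℕ) (h1 : 1 ≤ N) (h2 : N ≤ n) :
    (List.range n).countP (fun m => decide ((m + 1) ∣ N)) = N.divisors.card := by
  have e1 : (List.range n).countP (fun m => decide ((m + 1) ∣ N))
      = ((Finset.range n).filter (fun m => (m + 1) ∣ N)).card := by
    simp [Finset.card, Finset.filter, Finset.range, Multiset.range, List.countP_eq_length_filter]
  rw [e1]
  apply Finset.card_bij (fun m _ => m + 1)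
  · intro m hm
    simp only [Finset.mem_filter, Finset.mem_range] at hm
    exact Nat.mem_divisors.mpr ⟨hm.2, by omega⟩
  · intro a ha b hb hab; omega
  · intro d hd
    rw [Nat.mem_divisors] at hd
    have hd1 : 1 ≤ d := Nat.pos_of_dvd_of_pos hd.1 (by omega)
    have hdN : d ≤ N := Nat.le_of_dvd (by omega) hd.1
    exact ⟨d - 1, by simp only [Finset.mem_filter, Finset.mem_range]; constructor <;> [omega; simpa [Nat.sub_add_cancel hd1] using hd.1], by omega⟩

-- ---- filtering the squares out of range n gives squaresTo n ----
theorem filter_square_range (n : ℕ) :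
    ((List.range n).filter (fun t => decide (IsSquare (t + 1)))).map
      (fun (t : ℕ) => ((t : Int)) + 1) = squaresTo n := by
  induction n with
  | zero => simp [squaresTo]
  | succ n ih =>
    rw [List.range_succ, List.filter_append, List.map_append, ih]
    by_cases hsq : IsSquare (n + 1)
    · have hs : Nat.sqrt (n + 1) = Nat.sqrt n + 1 := sqrt_succ_of_square hsq
      have hval : n + 1 = (Nat.sqrt n + 1) * (Nat.sqrt n + 1) := by
        obtain ⟨r, hr⟩ := hsq
        have h2 : Nat.sqrt (n + 1) = r := by rw [hr, ← pow_two, Nat.sqrt_eq']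
        have h3 : r = Nat.sqrt n + 1 := by omega
        rw [← h3]; exact hr
      rw [List.filter_singleton]
      simp only [hsq, decide_true, cond_true, List.map_cons, List.map_nil,
        squaresTo, hs, List.range_succ, List.map_append]
      congr 1
      congr 1
      exact_mod_cast hval
    · have hs : Nat.sqrt (n + 1) = Nat.sqrt n := sqrt_succ_of_not_square hsq
      rw [List.filter_singleton]
      simp only [hsq, decide_false, cond_false, List.map_nil, List.append_nil, squaresTo, hs]

-- ---- side A ----
theorem ndoors_eq_squaresTo (ans : Int) : ndoors ans = squaresTo ans.toNat := by
  have hr : PySem.List.pyRange 0 ans 1 = (List.range ans.toNat).map (fun k : ℕ => (k : Int)) := by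
    rw [PySem.List.pyRange_one]
    simp
  simp only [ndoors, hr, PySem.List.foldl_append_singleton_eq_map, List.nil_append,
    List.foldl_map, List.length_map, List.length_range,
    PySem.List.pyGetD_natCast, PySem.List.pyRange_zero_natCast]
  rw [PySem.List.foldl_append_ite]
  rw [List.nil_append]
  rw [List.filter_congr, filter_square_range]
  intro t ht
  rw [List.mem_range] at ht
  simp only [List.getD_eq_getElem?_getD, List.getElem?_map, List.getElem?_range ht,
    Option.map_some, Option.getD_some, PySem.List.foldl_ite_add_one]
  have hcnt : (List.range ans.toNat).countP
      (fun (m : ℕ) => decide (PySem.Int.mod ((t : Int) + 1) ((m : Int) + 1) = 0))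
      = (t + 1).divisors.card := by
    rw [List.countP_congr, countP_divisors ans.toNat (t + 1) (by omega) (by omega)]
    intro m _
    simp only [decide_eq_true_eq, PySem.Int.mod_eq_zero_iff_dvd]
    constructor
    · intro h; exact_mod_cast h
    · intro h; exact_mod_cast h
  simp only [hcnt, decide_eq_decide, zero_add,
    PySem.Int.mod_eq_emod_of_pos (show (0:Int) < 2 by norm_num)]
  rw [← odd_card_divisors_iff (t + 1) (by omega), Nat.odd_iff]
  omega

-- ---- side B ----
theorem cond_iff (ans : Int) (k : Nat) (hk : 1 ≤ k) :
    ((k : Int) * (k : Int) ≤ ans) ↔ k ≤ Nat.sqrt ans.toNat := by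
  constructor
  · intro h
    have h0 : (0 : Int) ≤ ans := le_trans (by positivity) h
    have : (k * k : ℕ) ≤ ans.toNat := by omega
    exact Nat.le_sqrt'.mpr (by rwa [pow_two])
  · intro h
    have h1 : k * k ≤ ans.toNat := by
      calc k * k ≤ Nat.sqrt ans.toNat * Nat.sqrt ans.toNat := Nat.mul_le_mul h h
        _ ≤ ans.toNat := by have := Nat.sqrt_le' ans.toNat; rwa [pow_two] at this
    have h2 : 0 < ans.toNat := by
      have : 1 ≤ k * k := Nat.one_le_iff_ne_zero.mpr (by positivity)
      omega
    have : ((k * k : ℕ) : Int) ≤ (ans.toNat : Int) := by exact_mod_cast h1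
    push_cast at this
    omega

theorem ndoorsAltGo_eq (ans : Int) (k : Nat) (res : List Int) (hk : 1 ≤ k)
    (hle : k ≤ Nat.sqrt ans.toNat + 1) :
    ndoorsAltGo ans k res =
      res ++ (List.range' k (Nat.sqrt ans.toNat + 1 - k)).map
        (fun (j : ℕ) => (j : Int) * (j : Int)) := by
  generalize hd : Nat.sqrt ans.toNat + 1 - k = d
  induction d generalizing k res with
  | zero =>
    rw [ndoorsAltGo, dif_neg]
    · simp
    · rw [cond_iff ans k hk]; omega
  | succ d ih =>
    rw [ndoorsAltGo, dif_pos ((cond_iff ans k hk).mpr (by omega))]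
    rw [ih (k + 1) _ (by omega) (by omega) (by omega)]
    rw [List.range'_succ, List.map_cons, List.append_assoc]
    rfl

theorem ndoors_alt_eq_squaresTo (ans : Int) : ndoors_alt ans = squaresTo ans.toNat := by
  rw [ndoors_alt, ndoorsAltGo_eq ans 1 [] le_rfl (by omega)]
  simp only [Nat.add_sub_cancel, List.nil_append, squaresTo]
  rw [List.range'_eq_map_range]
  rw [List.map_map]
  apply List.map_congr_left
  intro a _
  simp [Nat.add_comm]

-- ===== VERDICT (by name: the statement is the Claim_ definition above) =====
theorem ndoors_spec : Claim_equal_ndoors := by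
  intro ans _
  unfold Spec_ndoors
  rw [ndoors_eq_squaresTo, ndoors_alt_eq_squaresTo]
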